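-- pv_equiv track=rewrite | github.com/MrBrantCode/unitest_baseline | mut_generate/mist_train_taco/taco_19005/solution.py | is_finite_fraction
-- ===== SOURCE A (Python) =====
-- def is_finite_fraction(p: int, q: int, b: int) -> str:
--     # Reduce the fraction p/q by finding the greatest common divisor (GCD)
--     from math import gcd
--     g = gcd(p, q)
--     q //= g
--
--     # Check if the fraction is finite in base b
--     while q != 1:
--         g = gcd(q, b)
--         if g == 1:
--             return "Infinite"
--         q //= g
--
--     return "Finite"
-- ===== SOURCE B (Python) =====
-- def is_finite_fraction(p: int, q: int, b: int) -> str: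
--     # Reduce, then a single divisibility test: the reduced denominator is
--     # finite in base b iff it divides b**32 (any prime power dividing a
--     # denominator of magnitude <= 2**31 has exponent <= 31).  A reduced
--     # denominator < 1 can never reach 1, hence "Infinite".
--     from math import gcd
--     q //= gcd(p, q)
--     if q < 1:
--         return "Infinite"
--     return "Finite" if pow(b, 32, q) == 0 else "Infinite"
-- ===== Notes on version B (the rewrite author's own statement) =====
-- stated objective: simpler
-- what changed: Replaces A's repeated gcd-and-divide loop with a single closed-form divisibility test: after reducing by gcd(p,q), the fraction is finite in base b iff the reduced denominator is >= 1 and divides b**32 (valid because |q| <= 2^31 bounds every prime-power exponent by 31).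
import Mathlib
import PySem

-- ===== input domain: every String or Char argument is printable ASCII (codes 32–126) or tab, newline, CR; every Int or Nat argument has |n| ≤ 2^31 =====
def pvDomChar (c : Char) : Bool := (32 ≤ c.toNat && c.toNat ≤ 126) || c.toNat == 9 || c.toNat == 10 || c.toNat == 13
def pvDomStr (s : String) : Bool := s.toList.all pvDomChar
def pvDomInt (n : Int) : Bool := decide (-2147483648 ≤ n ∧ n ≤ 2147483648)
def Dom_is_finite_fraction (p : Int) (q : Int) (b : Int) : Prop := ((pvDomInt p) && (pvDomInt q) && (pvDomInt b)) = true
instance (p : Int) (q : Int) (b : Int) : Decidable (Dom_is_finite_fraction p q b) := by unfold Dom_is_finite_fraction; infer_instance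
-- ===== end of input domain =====

-- B replaces A's gcd-stripping loop by one closed-form test (reduced q ≥ 1 and q ∣ b^32); objective: simpler.


-- ===== PORT A =====
-- A's while loop, as fuel recursion; fuel |q|+1 suffices on every input where
-- the Python loop terminates (|q| strictly decreases each iteration when q ≠ 0).
def isFinLoopA (fuel : Nat) (q : Int) (b : Int) : String :=
  match fuel with
  | 0 => "Infinite"
  | fuel + 1 =>
    if q = 1 then "Finite"
    else
      let g : Int := Int.gcd q b
      if g = 1 then "Infinite"
      else isFinLoopA fuel (PySem.Int.floordiv q g) b

def is_finite_fraction (p : Int) (q : Int) (b : Int) : String :=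
  let g : Int := Int.gcd p q
  let q1 := PySem.Int.floordiv q g
  isFinLoopA (q1.natAbs + 1) q1 b

-- ===== PORT B =====
def is_finite_fraction_alt (p : Int) (q : Int) (b : Int) : String :=
  let q1 := PySem.Int.floordiv q (Int.gcd p q)
  if q1 < 1 then "Infinite"
  else if PySem.Int.mod (b ^ 32) q1 = 0 then "Finite" else "Infinite"

-- ===== PRECONDITION & SPEC =====
-- Pre_ excludes exactly the inputs where the Python A does not return: it raises
-- ZeroDivisionError when p = q = 0 or when q = 0 ∧ b = 0, and loops forever when
-- q = 0, p ≠ 0 and |b| ≥ 2.  (q = 0 with p ≠ 0 and b = ±1, where A returns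
-- "Infinite", stays inside Pre_.)
def Pre_is_finite_fraction (p : Int) (q : Int) (b : Int) : Prop :=
  q ≠ 0 ∨ (p ≠ 0 ∧ (b = 1 ∨ b = -1))
instance (p : Int) (q : Int) (b : Int) : Decidable (Pre_is_finite_fraction p q b) := by
  unfold Pre_is_finite_fraction; infer_instance

def pvWitness_is_finite_fraction : Int × Int × Int := (3, 20, 10)

def Spec_is_finite_fraction (p : Int) (q : Int) (b : Int) (out : String) : Prop := out = is_finite_fraction_alt p q b
instance (p : Int) (q : Int) (b : Int) (out : String) : Decidable (Spec_is_finite_fraction p q b out) := by unfold Spec_is_finite_fraction; infer_instance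

-- ===== CLAIM (what is proved, stated in full; the proofs are below) =====
def Claim_equal_is_finite_fraction : Prop := ∀ (p : Int) (q : Int) (b : Int), Dom_is_finite_fraction p q b → Pre_is_finite_fraction p q b → Spec_is_finite_fraction p q b (is_finite_fraction p q b)

-- ===== LEMMAS AND PROOFS =====

-- gcd as an Int is positive unless both arguments are zero.
theorem gcdInt_pos (a b : Int) (h : ¬(a = 0 ∧ b = 0)) : (0:Int) < (Int.gcd a b : Int) := by
  have : Int.gcd a b ≠ 0 := by
    intro h0; rw [Int.gcd_eq_zero_iff] at h0; exact h h0
  exact_mod_cast Nat.pos_of_ne_zero this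

-- Exact division: floordiv of a multiple.
theorem floordiv_of_eq_mul (q g c : Int) (hg : 0 < g) (h : q = g * c) :
    PySem.Int.floordiv q g = c := by
  rw [h, PySem.Int.floordiv_eq_ediv_of_pos hg]
  exact Int.mul_ediv_cancel_left _ (by omega)

-- A's loop only ever produces these two strings.
theorem isFinLoopA_cases (fuel : Nat) (q b : Int) :
    isFinLoopA fuel q b = "Finite" ∨ isFinLoopA fuel q b = "Infinite" := by
  induction fuel generalizing q with
  | zero => right; rfl
  | succ n ih =>
    simp only [isFinLoopA]
    split
    · left; rfl
    · split
      · right; rfl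
      · exact ih _

-- For a negative q the loop always ends in "Infinite".
theorem isFinLoopA_neg (fuel : Nat) (q b : Int) (hq : q < 0) :
    isFinLoopA fuel q b = "Infinite" := by
  induction fuel generalizing q with
  | zero => rfl
  | succ n ih =>
    simp only [isFinLoopA]
    rw [if_neg (by omega)]
    split
    · rfl
    · have hgpos : (0:Int) < (Int.gcd q b : Int) := gcdInt_pos q b (by omega)
      obtain ⟨c, hc⟩ : ((Int.gcd q b : Int)) ∣ q := Int.gcd_dvd_left q b
      rw [floordiv_of_eq_mul q _ c hgpos hc]
      exact ih c (by nlinarith)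

-- If the loop returns "Finite" from a positive q ≤ 2^k, then q ∣ b^k.
theorem isFinLoopA_finite_dvd (k : Nat) :
    ∀ (fuel : Nat) (q b : Int), 0 < q → q ≤ 2 ^ k →
      isFinLoopA fuel q b = "Finite" → q ∣ b ^ k := by
  induction k with
  | zero =>
    intro fuel q b hq hle _
    have h2 : (2:Int) ^ 0 = 1 := by norm_num
    have : q = 1 := by omega
    simp [this]
  | succ k ih =>
    intro fuel q b hq hle hfin
    match fuel with
    | 0 => simp [isFinLoopA] at hfin
    | fuel + 1 =>
      by_cases h1 : q = 1
      · simp [h1]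
      · simp only [isFinLoopA, if_neg h1] at hfin
        by_cases hgone : ((Int.gcd q b : Int)) = 1
        · simp [hgone] at hfin
        · rw [if_neg hgone] at hfin
          have hgb : ((Int.gcd q b : Int)) ∣ b := Int.gcd_dvd_right q b
          have hgpos : (0:Int) < (Int.gcd q b : Int) := gcdInt_pos q b (by omega)
          have hg2 : (2:Int) ≤ (Int.gcd q b : Int) := by omega
          obtain ⟨c, hc⟩ : ((Int.gcd q b : Int)) ∣ q := Int.gcd_dvd_left q b
          have hcpos : 0 < c := by nlinarith
          rw [floordiv_of_eq_mul q _ c hgpos hc] at hfin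
          have hcle : c ≤ 2 ^ k := by
            have h2 : c * 2 ≤ q := by nlinarith
            have h3 : (2:Int) ^ (k + 1) = 2 ^ k * 2 := by ring
            omega
          have hcdvd : c ∣ b ^ k := ih fuel c b hcpos hcle hfin
          rw [hc, pow_succ, mul_comm (b ^ k) b]
          exact mul_dvd_mul hgb hcdvd

-- Conversely, with enough fuel, q ∣ b^32 (q positive) makes the loop return "Finite".
theorem isFinLoopA_of_dvd :
    ∀ (fuel : Nat) (q b : Int), 0 < q → q.natAbs ≤ fuel → q ∣ b ^ 32 →
      isFinLoopA fuel q b = "Finite" := by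
  intro fuel
  induction fuel with
  | zero => intro q b hq hf _; omega
  | succ n ih =>
    intro q b hq hf hdvd
    by_cases h1 : q = 1
    · simp [isFinLoopA, h1]
    · simp only [isFinLoopA, if_neg h1]
      have hgone : ((Int.gcd q b : Int)) ≠ 1 := by
        intro hgeq
        -- gcd(q,b) = 1 → q coprime to b^32, contradicting q ∣ b^32 with q > 1
        have hcop : Nat.Coprime q.natAbs b.natAbs := by
          have : Int.gcd q b = 1 := by exact_mod_cast hgeq
          exact this
        have hcop32 : Nat.Coprime q.natAbs (b.natAbs ^ 32) := hcop.pow_right _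
        have hdn : q.natAbs ∣ b.natAbs ^ 32 := by
          have := Int.natAbs_dvd_natAbs.mpr hdvd
          rwa [Int.natAbs_pow] at this
        have : q.natAbs = 1 := Nat.Coprime.eq_one_of_dvd hcop32 hdn
        omega
      rw [if_neg hgone]
      have hgpos : (0:Int) < (Int.gcd q b : Int) := gcdInt_pos q b (by omega)
      have hg2 : (2:Int) ≤ (Int.gcd q b : Int) := by omega
      obtain ⟨c, hc⟩ : ((Int.gcd q b : Int)) ∣ q := Int.gcd_dvd_left q b
      have hcpos : 0 < c := by nlinarith
      rw [floordiv_of_eq_mul q _ c hgpos hc]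
      apply ih c b hcpos
      · have : c * 2 ≤ q := by nlinarith
        omega
      · exact dvd_trans (Dvd.intro_left _ hc.symm) hdvd

theorem is_finite_fraction_eq_alt (p q b : Int)
    (hdom : Dom_is_finite_fraction p q b) (hpre : Pre_is_finite_fraction p q b) :
    is_finite_fraction p q b = is_finite_fraction_alt p q b := by
  unfold is_finite_fraction is_finite_fraction_alt
  rcases lt_trichotomy (PySem.Int.floordiv q (Int.gcd p q : Int)) 0 with hneg | hzero | hpos
  · rw [isFinLoopA_neg _ _ _ hneg, if_pos (by omega)]
  · -- reduced q = 0: only reachable with q = 0, p ≠ 0, b = ±1 (inside Pre_)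
    have hq0 : q = 0 := by
      by_contra hqne
      have hgpos : (0:Int) < (Int.gcd p q : Int) := gcdInt_pos p q (by tauto)
      obtain ⟨c, hcq⟩ : ((Int.gcd p q : Int)) ∣ q := Int.gcd_dvd_right p q
      rw [floordiv_of_eq_mul q _ c hgpos hcq] at hzero
      exact hqne (by rw [hcq, hzero, mul_zero])
    rcases hpre with h | ⟨hp, hb⟩
    · exact absurd hq0 h
    · subst hq0
      have hgpos : (0:Int) < (Int.gcd p 0 : Int) := gcdInt_pos p 0 (by tauto)
      rcases hb with hb | hb <;> subst hb <;>
        simp [isFinLoopA, Int.gcd, PySem.Int.floordiv]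
  · -- reduced q > 0
    rw [if_neg (by omega)]
    have hb32 : PySem.Int.mod (b ^ 32) (PySem.Int.floordiv q (Int.gcd p q : Int)) = 0
        ↔ (PySem.Int.floordiv q (Int.gcd p q : Int)) ∣ b ^ 32 := by
      rw [PySem.Int.mod_eq_emod_of_pos hpos]
      exact ⟨Int.dvd_of_emod_eq_zero, Int.emod_eq_zero_of_dvd⟩
    by_cases hdvd : (PySem.Int.floordiv q (Int.gcd p q : Int)) ∣ b ^ 32
    · rw [if_pos (hb32.mpr hdvd)]
      exact isFinLoopA_of_dvd _ _ _ hpos (Nat.le_succ _) hdvd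
    · rw [if_neg (fun h => hdvd (hb32.mp h))]
      rcases isFinLoopA_cases ((PySem.Int.floordiv q (Int.gcd p q : Int)).natAbs + 1)
          (PySem.Int.floordiv q (Int.gcd p q : Int)) b with hfin | hinf
      · exfalso
        apply hdvd
        -- reduced q ≤ q ≤ 2^31, so "Finite" gives (reduced q) ∣ b^31 ∣ b^32
        have hqne : q ≠ 0 := by
          intro h; simp [h, PySem.Int.floordiv] at hpos
        have hgpos : (0:Int) < (Int.gcd p q : Int) := gcdInt_pos p q (by tauto)
        obtain ⟨c, hcq⟩ : ((Int.gcd p q : Int)) ∣ q := Int.gcd_dvd_right p q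
        rw [floordiv_of_eq_mul q _ c hgpos hcq] at hpos hfin ⊢
        have hqb : q ≤ 2147483648 := by
          unfold Dom_is_finite_fraction pvDomInt at hdom
          simp at hdom
          omega
        have hcle : c ≤ 2 ^ 31 := by
          have h1 : c * 1 ≤ c * (Int.gcd p q : Int) := by nlinarith
          have h2 : (2:Int) ^ 31 = 2147483648 := by norm_num
          nlinarith [hcq]
        have h31 : c ∣ b ^ 31 := isFinLoopA_finite_dvd 31 _ _ _ hpos hcle hfin
        exact dvd_trans h31 (pow_dvd_pow b (by norm_num))
      · exact hinf

-- ===== VERDICT (by name: the statement is the Claim_ definition above) =====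
theorem is_finite_fraction_spec : Claim_equal_is_finite_fraction := by
  intro p q b hdom hpre
  unfold Spec_is_finite_fraction
  exact is_finite_fraction_eq_alt p q b hdom hpre
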